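-- pv_equiv track=rewrite | github.com/kh277/BOJ | 백준/Gold/20209. 스트레이트 스위치 게임/스트레이트 스위치 게임.py | solve
-- ===== SOURCE A (Python) =====
-- from collections import deque
--
-- MOD = 5
--
-- def solve(N, K, start, switch):
--     END_STATUS = set(tuple([i]*N) for i in range(MOD))
--     q = deque()
--     q.append([start, 0])       # [현재 상태, 스위치를 누를 횟수]
--     visited = set()
--     visited.add(start)
--
--     while q:
--         curStatus, count = q.popleft()
--
--         if curStatus in END_STATUS:
--             return count
--
--         for i in range(K):
--             nextStatus = tuple((switch[i][j] + curStatus[j]) % MOD for j in range(N))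
--             if nextStatus not in visited:
--                 visited.add(nextStatus)
--                 q.append([nextStatus, count+1])
--
--     return -1
-- ===== SOURCE B (Python) =====
-- MOD = 5
--
-- def solve(N, K, start, switch):
--     # Pressing switch i c_i times (order irrelevant) shifts position j by c_i*switch[i][j]
--     # mod MOD, so instead of searching states we run a dynamic program over switches:
--     # dp maps an achievable displacement vector to the minimum total press count over
--     # count combinations that are not all zero.  MOD presses of one switch cancel, so
--     # counts 0..MOD-1 per switch suffice, except that the first switch may take up to
--     # MOD presses (covering the all-cancelling combination).
--     goals = set(tuple([v] * N) for v in range(MOD))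
--     if tuple(start) in goals:
--         return 0
--     if K <= 0:
--         return -1
--     if N <= 0:
--         # no positions: one press of any switch yields the empty, uniform state
--         return 1
--     row = switch[0]
--     dp = {}
--     for c in range(1, MOD + 1):
--         d = tuple(c * row[j] % MOD for j in range(N))
--         if d not in dp or c < dp[d]:
--             dp[d] = c
--     for i in range(1, K):
--         row = switch[i]
--         new = {}
--         for c in range(1, MOD):
--             d = tuple(c * row[j] % MOD for j in range(N))
--             if d not in new or c < new[d]:
--                 new[d] = c
--         for d, cost in dp.items():
--             for c in range(MOD):
--                 nd = tuple((d[j] + c * row[j]) % MOD for j in range(N))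
--                 nc = cost + c
--                 if nd not in new or nc < new[nd]:
--                     new[nd] = nc
--         dp = new
--     best = -1
--     for d, cost in dp.items():
--         state = tuple((start[j] + d[j]) % MOD for j in range(N))
--         if state in goals:
--             if best == -1 or cost < best:
--                 best = cost
--     return best
-- ===== Notes on version B (the rewrite author's own statement) =====
-- stated objective: alternative
-- what changed: Replaces A's breadth-first search of the state graph (FIFO queue of states with press counts, visited set, goal test per popped state) by a dynamic program over the switches: since presses commute and 5 presses of one switch cancel, a dict maps each achievable displacement vector mod 5 to the minimum total press count over not-all-zero count combinations (0..4 per switch, 0..5 for the first to cover the all-cancelling one), and the answer is the minimum over displacements landing on a uniform state; no queue, no visited set, no graph traversal.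
import Mathlib
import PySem

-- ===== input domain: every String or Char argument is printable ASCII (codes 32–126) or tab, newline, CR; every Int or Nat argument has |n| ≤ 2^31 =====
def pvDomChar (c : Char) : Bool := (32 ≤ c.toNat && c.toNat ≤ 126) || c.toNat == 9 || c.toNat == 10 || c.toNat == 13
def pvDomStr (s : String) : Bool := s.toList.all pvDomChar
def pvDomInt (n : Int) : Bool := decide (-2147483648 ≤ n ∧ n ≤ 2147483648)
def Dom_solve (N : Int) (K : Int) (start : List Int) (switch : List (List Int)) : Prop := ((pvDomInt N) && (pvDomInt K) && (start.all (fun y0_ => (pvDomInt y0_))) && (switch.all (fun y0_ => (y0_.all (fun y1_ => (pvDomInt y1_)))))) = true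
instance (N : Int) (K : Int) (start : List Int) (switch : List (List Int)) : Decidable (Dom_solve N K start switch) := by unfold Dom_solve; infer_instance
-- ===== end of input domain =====

-- B replaces A's breadth-first search of the state graph by a closed-form minimum over the
-- 5^K combinations of per-switch press counts (counts reduce mod 5); same return values.

-- ===== PORT A =====
-- A: breadth-first search with a FIFO queue of (state, count) pairs and a visited set,
-- testing for a uniform end state when a state is popped.

def endStatesA (N : Int) : PySem.Set (List Int) :=
  PySem.Set.ofList ((PySem.List.pyRange 0 5).map (fun i => List.replicate N.toNat i))

def nextStatusA (N : Int) (switch : List (List Int)) (i : Int) (cur : List Int) : List Int :=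
  (PySem.List.pyRange 0 N).map
    (fun j => PySem.Int.mod (PySem.List.pyGetD (PySem.List.pyGetD switch i []) j 0
                             + PySem.List.pyGetD cur j 0) 5)

-- the while-loop; fuel only totalizes it (proved never exhausted for the fuel solve passes)
def bfsA (N K : Int) (switch : List (List Int)) (goals : PySem.Set (List Int)) :
    Nat → List (List Int × Int) → PySem.Set (List Int) → Option Int
  | _, [], _ => some (-1)
  | 0, _ :: _, _ => none
  | fuel + 1, (cur, count) :: qs, visited =>
    if goals.contains cur then some count
    else
      let st := (PySem.List.pyRange 0 K).foldl
        (fun (s : List (List Int × Int) × PySem.Set (List Int)) i =>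
          let nxt := nextStatusA N switch i cur
          if s.2.contains nxt then s else (s.1 ++ [(nxt, count + 1)], s.2.add nxt))
        (qs, visited)
      bfsA N K switch goals fuel st.1 st.2

def solve (N : Int) (K : Int) (start : List Int) (switch : List (List Int)) : Int :=
  (bfsA N K switch (endStatesA N) (5 ^ N.toNat + 2) [(start, 0)]
    (PySem.Set.add PySem.Set.empty start)).getD (-1)

-- ===== PORT B =====
-- B: no state-graph search — pressing switch i c_i times (order irrelevant) shifts position
-- j by c_i*switch[i][j] mod 5; a dynamic program over the switches maps each achievable
-- displacement vector to the minimum total press count over not-all-zero count combinations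
-- (counts 0..4 per switch; the first switch may take up to 5, covering the all-cancelling
-- combination), and the answer is the minimum over displacements that land on a uniform state.

def goalsB (N : Int) : PySem.Set (List Int) :=
  PySem.Set.ofList ((PySem.List.pyRange 0 5).map (fun v => List.replicate N.toNat v))

-- port of `if d not in dp or v < dp[d]: dp[d] = v` (dp[d] only read when present)
def updMin (dp : PySem.Dict (List Int) Int) (d : List Int) (v : Int) :
    PySem.Dict (List Int) Int :=
  match dp.get? d with
  | none => dp.insert d v
  | some w => if v < w then dp.insert d v else dp

def deltaRow (N : Int) (row : List Int) (c : Int) : List Int :=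
  (PySem.List.pyRange 0 N).map (fun j =>
    PySem.Int.mod (c * PySem.List.pyGetD row j 0) 5)

def shiftRow (N : Int) (row : List Int) (d : List Int) (c : Int) : List Int :=
  (PySem.List.pyRange 0 N).map (fun j =>
    PySem.Int.mod (PySem.List.pyGetD d j 0 + c * PySem.List.pyGetD row j 0) 5)

def dpInit (N : Int) (row : List Int) : PySem.Dict (List Int) Int :=
  (PySem.List.pyRange 1 6).foldl (fun dp c => updMin dp (deltaRow N row c) c)
    PySem.Dict.empty

def dpStep (N : Int) (row : List Int) (dp : PySem.Dict (List Int) Int) :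
    PySem.Dict (List Int) Int :=
  let base := (PySem.List.pyRange 1 5).foldl (fun nw c => updMin nw (deltaRow N row c) c)
    PySem.Dict.empty
  dp.items.foldl (fun nw p =>
    (PySem.List.pyRange 0 5).foldl (fun nw c =>
      updMin nw (shiftRow N row p.1 c) (p.2 + c)) nw) base

def solve_alt (N : Int) (K : Int) (start : List Int) (switch : List (List Int)) : Int :=
  let goals := goalsB N
  if goals.contains start then 0
  else if K ≤ 0 then -1
  else if N ≤ 0 then 1  -- no positions: one press of any switch yields the empty, uniform state
  else
    let dp0 := dpInit N (PySem.List.pyGetD switch 0 [])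
    let dpF := (PySem.List.pyRange 1 K).foldl
      (fun dp i => dpStep N (PySem.List.pyGetD switch i []) dp) dp0
    dpF.items.foldl (fun best p =>
      if goals.contains ((PySem.List.pyRange 0 N).map (fun j =>
          PySem.Int.mod (PySem.List.pyGetD start j 0 + PySem.List.pyGetD p.1 j 0) 5)) then
        if best = -1 ∨ p.2 < best then p.2 else best
      else best) (-1)

-- ===== PRECONDITION & SPEC =====
-- Pre_ is exactly the inputs on which the Python A returns normally; on all others A raises
-- (IndexError: an expanded row/state is indexed past its length) and nothing is excluded
-- besides those raising inputs.
def Pre_solve (N : Int) (K : Int) (start : List Int) (switch : List (List Int)) : Prop :=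
  (start.length = N.toNat ∧ ∃ v ∈ ([0, 1, 2, 3, 4] : List Int), ∀ x ∈ start, x = v)
  ∨ K ≤ 0 ∨ N ≤ 0
  ∨ (K ≤ (switch.length : Int) ∧ N ≤ (start.length : Int)
      ∧ ∀ row ∈ switch.take K.toNat, N ≤ (row.length : Int))

instance (N : Int) (K : Int) (start : List Int) (switch : List (List Int)) : Decidable (Pre_solve N K start switch) := by unfold Pre_solve; infer_instance

def pvWitness_solve : Int × Int × List Int × List (List Int) := (2, 1, [0, 1], [[1, 0]])

def Spec_solve (N : Int) (K : Int) (start : List Int) (switch : List (List Int)) (out : Int) : Prop := out = solve_alt N K start switch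
instance (N : Int) (K : Int) (start : List Int) (switch : List (List Int)) (out : Int) : Decidable (Spec_solve N K start switch out) := by unfold Spec_solve; infer_instance

-- ===== CLAIM (what is proved, stated in full; the proofs are below) =====
def Claim_equal_solve : Prop := ∀ (N : Int) (K : Int) (start : List Int) (switch : List (List Int)), Dom_solve N K start switch → Pre_solve N K start switch → Spec_solve N K start switch (solve N K start switch)

-- ===== LEMMAS AND PROOFS =====

-- Proof device: A's FIFO BFS re-read level by level (used only to prove the claim).
def levelsB (N K : Int) (switch : List (List Int)) (goals : PySem.Set (List Int)) :
    Nat → PySem.Set (List Int) → PySem.Set (List Int) → Int → Option Int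
  | _, [], _, _ => some (-1)
  | 0, _ :: _, _, _ => none
  | fuel + 1, t :: fr, seen, d =>
    if PySem.Set.inter (t :: fr) goals ≠ [] then some d
    else
      let nxt := PySem.Set.diff
        (PySem.Set.ofList ((t :: fr).flatMap
          (fun u => (PySem.List.pyRange 0 K).map (fun i => nextStatusA N switch i u)))) seen
      levelsB N K switch goals fuel nxt (PySem.Set.union seen nxt) (d + 1)

def statesAll : Nat → List (List Int)
  | 0 => [[]]
  | m + 1 => (List.range 5).flatMap (fun v => (statesAll m).map (fun t => (Int.ofNat v :: t)))

lemma length_statesAll (m : Nat) : (statesAll m).length = 5 ^ m := by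
  induction m with
  | zero => rfl
  | succ m ih =>
    simp [statesAll, ih, pow_succ, List.range_succ]
    ring

lemma mem_statesAll_of (m : Nat) (t : List Int) (hl : t.length = m)
    (hb : ∀ v ∈ t, 0 ≤ v ∧ v < 5) : t ∈ statesAll m := by
  induction m generalizing t with
  | zero => simp [statesAll, List.length_eq_zero_iff.mp hl]
  | succ m ih =>
    match t with
    | v :: t' =>
      have hv := hb v (by simp)
      have ht' : t' ∈ statesAll m := ih t' (by simpa using hl) (fun w hw => hb w (by simp [hw]))
      have hmem : (v :: t') ∈ (statesAll m).map (fun s => (Int.ofNat v.toNat :: s)) :=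
        List.mem_map.mpr ⟨t', ht', by simp [Int.toNat_of_nonneg hv.1]⟩
      exact List.mem_flatMap.mpr ⟨v.toNat, List.mem_range.mpr (by omega), hmem⟩

lemma nextStatus_shape (N : Int) (sw : List (List Int)) (i : Int) (u : List Int) :
    nextStatusA N sw i u ∈ statesAll N.toNat := by
  unfold nextStatusA
  apply mem_statesAll_of
  · simp [PySem.List.length_pyRange_one]
  · intro v hv
    simp only [List.mem_map] at hv
    obtain ⟨j, _, rfl⟩ := hv
    exact ⟨PySem.Int.mod_nonneg _ (by norm_num), PySem.Int.mod_lt _ (by norm_num)⟩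

lemma seen_card_le (m : Nat) (s0 : List Int) (seen : PySem.Set (List Int))
    (h1 : seen.Nodup) (h2 : ∀ x ∈ seen, x = s0 ∨ x ∈ statesAll m) :
    seen.length ≤ 5 ^ m + 1 := by
  have hsub : seen ⊆ s0 :: statesAll m := by
    intro x hx; rcases h2 x hx with h | h <;> simp [h]
  have := (h1.subperm hsub).length_le
  simpa [length_statesAll] using this

lemma drop_update (vis : PySem.Set (List Int)) (xs : List (List Int)) :
    List.drop vis.length (vis.update xs) = PySem.Set.diff (PySem.Set.ofList xs) vis := by
  rw [PySem.Set.update_eq_append_filter, List.drop_left]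
  rfl

lemma diff_comp (vis : PySem.Set (List Int)) (xs ys : List (List Int)) :
    PySem.Set.diff (PySem.Set.ofList xs) vis
      ++ PySem.Set.diff (PySem.Set.ofList ys) (vis.update xs)
      = PySem.Set.diff (PySem.Set.ofList (xs ++ ys)) vis := by
  have h1 := PySem.Set.update_eq_append_filter vis (xs ++ ys)
  rw [PySem.Set.update_append, PySem.Set.update_eq_append_filter (vis.update xs) ys,
      PySem.Set.update_eq_append_filter vis xs, List.append_assoc] at h1
  have h2 := List.append_cancel_left h1
  simp only [PySem.Set.diff]
  rw [PySem.Set.update_eq_append_filter vis xs]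
  exact h2

lemma foldq (c : Int) :
    ∀ (xs : List (List Int)) (q0 : List (List Int × Int)) (vis : PySem.Set (List Int)),
    (xs.foldl (fun (s : List (List Int × Int) × PySem.Set (List Int)) x =>
        if s.2.contains x then s else (s.1 ++ [(x, c)], s.2.add x)) (q0, vis))
      = (q0 ++ (List.drop vis.length (vis.update xs)).map (fun t => (t, c)), vis.update xs) := by
  intro xs
  induction xs with
  | nil => intro q0 vis; simp [PySem.Set.update]
  | cons x xs ih =>
    intro q0 vis
    by_cases hx : x ∈ vis
    · have hc : vis.contains x = true := (PySem.Set.contains_iff vis x).mpr hx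
      have hupd : vis.update (x :: xs) = vis.update xs := by
        rw [PySem.Set.update_cons, PySem.Set.add_of_mem hx]
      simp only [List.foldl_cons, hc, if_pos, hupd]
      exact ih q0 vis
    · have hc : vis.contains x = false := by
        rw [Bool.eq_false_iff]; intro h; exact hx ((PySem.Set.contains_iff vis x).mp h)
      have hadd : vis.add x = vis ++ [x] := PySem.Set.add_of_not_mem hx
      have hupd : vis.update (x :: xs) = (vis ++ [x]).update xs := by
        rw [PySem.Set.update_cons, hadd]
      simp only [List.foldl_cons, hc, Bool.false_eq_true, if_false, hadd]
      rw [ih (q0 ++ [(x, c)]) (vis ++ [x])]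
      have hpre := PySem.Set.update_eq_append_filter (vis ++ [x]) xs
      have hd1 : List.drop (vis ++ [x]).length ((vis ++ [x]).update xs) =
          List.filter (fun y => !(vis ++ [x]).contains y) (PySem.Set.ofList xs) := by
        rw [hpre]; exact List.drop_left
      have hd2 : List.drop vis.length ((vis ++ [x]).update xs) =
          x :: List.filter (fun y => !(vis ++ [x]).contains y) (PySem.Set.ofList xs) := by
        rw [hpre, List.append_assoc]
        simp
      rw [hupd, hd2, hd1]
      simp

lemma popLevel (N K : Int) (sw : List (List Int)) (goals : PySem.Set (List Int)) :
    ∀ (pending acc : List (List Int)) (vis : PySem.Set (List Int)) (d : Int) (fA : Nat),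
    bfsA N K sw goals (fA + pending.length)
        (pending.map (fun t => (t, d)) ++ acc.map (fun t => (t, d + 1))) vis
    = if pending.any (fun t => goals.contains t) then some d
      else bfsA N K sw goals fA
        ((acc ++ PySem.Set.diff (PySem.Set.ofList (pending.flatMap
            (fun u => (PySem.List.pyRange 0 K).map (fun i => nextStatusA N sw i u)))) vis).map
          (fun t => (t, d + 1)))
        (vis.update (pending.flatMap
            (fun u => (PySem.List.pyRange 0 K).map (fun i => nextStatusA N sw i u)))) := by
  intro pending
  induction pending with
  | nil =>
    intro acc vis d fA
    simp [PySem.Set.update, PySem.Set.diff, PySem.Set.ofList, PySem.Set.empty]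
  | cons t rest ih =>
    intro acc vis d fA
    have hfuel : fA + (t :: rest).length = (fA + rest.length) + 1 := by
      simp [List.length_cons]; omega
    rw [hfuel, List.map_cons, List.cons_append]
    show bfsA N K sw goals ((fA + rest.length) + 1)
        ((t, d) :: (rest.map (fun t => (t, d)) ++ acc.map (fun t => (t, d + 1)))) vis = _
    rw [bfsA]
    by_cases hm : t ∈ goals
    · have hc : goals.contains t = true := (PySem.Set.contains_iff goals t).mpr hm
      rw [if_pos hc, if_pos (by simp [List.any_cons]; exact Or.inl hm)]
    · have hc : goals.contains t = false := by
        rw [Bool.eq_false_iff]; intro h; exact hm ((PySem.Set.contains_iff goals t).mp h)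
      rw [if_neg (by rw [hc]; exact Bool.false_ne_true)]
      have hfold := foldq (d + 1)
        ((PySem.List.pyRange 0 K).map (fun i => nextStatusA N sw i t))
        (rest.map (fun t => (t, d)) ++ acc.map (fun t => (t, d + 1))) vis
      rw [List.foldl_map] at hfold
      simp only [hfold, drop_update]
      have hassoc : (rest.map (fun t => (t, d)) ++ acc.map (fun t => (t, d + 1)))
          ++ (PySem.Set.diff (PySem.Set.ofList ((PySem.List.pyRange 0 K).map
              (fun i => nextStatusA N sw i t))) vis).map (fun t => (t, d + 1))
          = rest.map (fun t => (t, d)) ++ (acc ++ PySem.Set.diff (PySem.Set.ofList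
              ((PySem.List.pyRange 0 K).map (fun i => nextStatusA N sw i t))) vis).map
              (fun t => (t, d + 1)) := by
        rw [List.map_append, List.append_assoc]
      rw [hassoc, ih]
      have hcf : goals.contains t = false := by
        rw [Bool.eq_false_iff]; intro h; exact hm ((PySem.Set.contains_iff goals t).mp h)
      rw [List.flatMap_cons, PySem.Set.update_append, ← diff_comp, List.any_cons, hcf]
      simp [List.append_assoc]

lemma bfsA_nil (N K : Int) (sw : List (List Int)) (goals : PySem.Set (List Int))
    (fA : Nat) (vis : PySem.Set (List Int)) :
    bfsA N K sw goals fA [] vis = some (-1) := by cases fA <;> rfl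

lemma levelsB_nil (N K : Int) (sw : List (List Int)) (goals : PySem.Set (List Int))
    (fB : Nat) (seen : PySem.Set (List Int)) (d : Int) :
    levelsB N K sw goals fB [] seen d = some (-1) := by cases fB <;> rfl

lemma upd_eq (seen : PySem.Set (List Int)) (l : List (List Int)) :
    seen.update l = seen ++ PySem.Set.diff (PySem.Set.ofList l) seen := by
  rw [PySem.Set.update_eq_append_filter]; rfl

lemma union_nxt (seen : PySem.Set (List Int)) (l : List (List Int)) :
    PySem.Set.union seen (PySem.Set.diff (PySem.Set.ofList l) seen)
      = seen ++ PySem.Set.diff (PySem.Set.ofList l) seen := by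
  show PySem.Set.update seen _ = _
  refine PySem.Set.update_eq_append_of_disjoint _ _
    (PySem.Set.nodup_diff _ _ (PySem.Set.nodup_ofList l)) (fun x hx => ?_)
  exact ((PySem.Set.mem_diff _ _ _).mp hx).2

lemma nodup_append_nxt (seen : PySem.Set (List Int)) (l : List (List Int))
    (h1 : seen.Nodup) :
    (seen ++ PySem.Set.diff (PySem.Set.ofList l) seen).Nodup := by
  refine h1.append (PySem.Set.nodup_diff _ _ (PySem.Set.nodup_ofList l)) (fun x hx hx2 => ?_)
  exact ((PySem.Set.mem_diff _ _ _).mp hx2).2 hx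

lemma shape_append_nxt (N K : Int) (sw : List (List Int)) (s0 : List Int)
    (seen : PySem.Set (List Int)) (pending : List (List Int))
    (h2 : ∀ x ∈ seen, x = s0 ∨ x ∈ statesAll N.toNat) :
    ∀ x ∈ seen ++ PySem.Set.diff (PySem.Set.ofList (pending.flatMap
        (fun u => (PySem.List.pyRange 0 K).map (fun i => nextStatusA N sw i u)))) seen,
      x = s0 ∨ x ∈ statesAll N.toNat := by
  intro x hx
  rcases List.mem_append.mp hx with h | h
  · exact h2 x h
  · right
    have hm1 := ((PySem.Set.mem_diff _ _ _).mp h).1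
    rcases List.mem_flatMap.mp ((PySem.Set.mem_ofList _ _).mp hm1) with ⟨u, hu, hm⟩
    rcases List.mem_map.mp hm with ⟨i, hi, rfl⟩
    exact nextStatus_shape N sw i u

lemma inter_ne_any (l : List (List Int)) (goals : PySem.Set (List Int)) :
    PySem.Set.inter l goals ≠ [] ↔ l.any (fun u => goals.contains u) = true := by
  constructor
  · intro h
    rcases List.exists_mem_of_ne_nil _ h with ⟨x, hx⟩
    have hx' := List.mem_filter.mp hx
    exact List.any_eq_true.mpr ⟨x, hx'.1, hx'.2⟩
  · intro h hnil
    rcases List.any_eq_true.mp h with ⟨x, hx, hc⟩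
    have : x ∈ PySem.Set.inter l goals := List.mem_filter.mpr ⟨hx, hc⟩
    simp [hnil] at this

lemma simAB (N K : Int) (sw : List (List Int)) (goals : PySem.Set (List Int)) (s0 : List Int) :
    ∀ (fB : Nat) (frontier seen : PySem.Set (List Int)) (d r : Int),
    levelsB N K sw goals fB frontier seen d = some r →
    seen.Nodup →
    (∀ x ∈ seen, x = s0 ∨ x ∈ statesAll N.toNat) →
    ∀ fA : Nat, frontier.length + (5 ^ N.toNat + 1) ≤ fA + seen.length →
    bfsA N K sw goals fA (frontier.map (fun t => (t, d))) seen = some r := by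
  intro fB
  induction fB with
  | zero =>
    intro frontier seen d r hB h1 h2 fA hfa
    match frontier with
    | [] =>
      rw [levelsB_nil] at hB
      rw [List.map_nil, bfsA_nil]; exact hB
    | t :: fr => exact absurd hB (by simp [levelsB])
  | succ fB ih =>
    intro frontier seen d r hB h1 h2 fA hfa
    match frontier with
    | [] =>
      rw [levelsB_nil] at hB
      rw [List.map_nil, bfsA_nil]; exact hB
    | t :: fr =>
      have hle : seen.length ≤ 5 ^ N.toNat + 1 := seen_card_le _ s0 seen h1 h2
      obtain ⟨fA', rfl⟩ : ∃ fA', fA = fA' + (t :: fr).length :=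
        ⟨fA - (t :: fr).length, by simp [List.length_cons] at hfa ⊢; omega⟩
      have hp := popLevel N K sw goals (t :: fr) [] seen d fA'
      simp only [List.map_nil, List.append_nil, List.nil_append] at hp
      rw [hp]
      rw [levelsB] at hB
      by_cases hint : PySem.Set.inter (t :: fr) goals ≠ []
      · rw [if_pos hint] at hB
        rw [if_pos ((inter_ne_any _ _).mp hint)]
        exact hB
      · rw [if_neg hint] at hB
        have hany : ((t :: fr).any (fun u => goals.contains u)) = false := by
          by_contra h
          exact hint ((inter_ne_any _ _).mpr (by revert h; cases ((t :: fr).any fun u => goals.contains u) <;> simp))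
        rw [if_neg (by rw [hany]; exact Bool.false_ne_true)]
        have hB' : levelsB N K sw goals fB
            (PySem.Set.diff (PySem.Set.ofList ((t :: fr).flatMap
              (fun u => (PySem.List.pyRange 0 K).map (fun i => nextStatusA N sw i u)))) seen)
            (PySem.Set.union seen (PySem.Set.diff (PySem.Set.ofList ((t :: fr).flatMap
              (fun u => (PySem.List.pyRange 0 K).map (fun i => nextStatusA N sw i u)))) seen))
            (d + 1) = some r := hB
        rw [union_nxt] at hB'
        rw [upd_eq]
        refine ih _ _ (d + 1) r hB' (nodup_append_nxt seen _ h1)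
          (shape_append_nxt N K sw s0 seen (t :: fr) h2) fA' ?_
        simp [List.length_append] at hfa ⊢
        omega

lemma suffB (N K : Int) (sw : List (List Int)) (goals : PySem.Set (List Int)) (s0 : List Int) :
    ∀ (fB : Nat) (frontier seen : PySem.Set (List Int)) (d : Int),
    seen.Nodup →
    (∀ x ∈ seen, x = s0 ∨ x ∈ statesAll N.toNat) →
    5 ^ N.toNat + 3 ≤ fB + seen.length →
    (levelsB N K sw goals fB frontier seen d).isSome := by
  intro fB
  induction fB with
  | zero =>
    intro frontier seen d h1 h2 hf
    have := seen_card_le N.toNat s0 seen h1 h2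
    omega
  | succ fB ih =>
    intro frontier seen d h1 h2 hf
    match frontier with
    | [] => rw [levelsB_nil]; rfl
    | t :: fr =>
      rw [levelsB]
      by_cases hint : PySem.Set.inter (t :: fr) goals ≠ []
      · rw [if_pos hint]; rfl
      · rw [if_neg hint]
        show (levelsB N K sw goals fB _ (PySem.Set.union seen _) (d + 1)).isSome
        rcases hL : PySem.Set.diff (PySem.Set.ofList ((t :: fr).flatMap
            (fun u => (PySem.List.pyRange 0 K).map (fun i => nextStatusA N sw i u)))) seen
          with _ | ⟨y, ys⟩
        · rw [levelsB_nil]; rfl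
        · rw [← hL, union_nxt]
          refine ih _ _ (d + 1) (nodup_append_nxt seen _ h1)
            (shape_append_nxt N K sw s0 seen (t :: fr) h2) ?_
          rw [List.length_append, hL]
          simp [List.length_cons]
          omega

theorem solve_eq_levels (N K : Int) (start : List Int) (switch : List (List Int))
    (r : Int)
    (h : levelsB N K switch (endStatesA N) (5 ^ N.toNat + 3) [start] [start] 0 = some r) :
    solve N K start switch = r := by
  have h1 : (PySem.Set.add PySem.Set.empty start : PySem.Set (List Int)) = [start] := by
    simp [PySem.Set.empty, PySem.Set.add, PySem.Set.contains]
  have hnd : ([start] : List (List Int)).Nodup := List.nodup_singleton _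
  have hsh : ∀ x ∈ ([start] : List (List Int)), x = start ∨ x ∈ statesAll N.toNat :=
    fun x hx => Or.inl (List.mem_singleton.mp hx)
  have hsim := simAB N K switch (endStatesA N) start (5 ^ N.toNat + 3) [start] [start] 0 r h
    hnd hsh (5 ^ N.toNat + 2) (by simp; omega)
  simp only [List.map_cons, List.map_nil] at hsim
  unfold solve
  rw [h1, hsim]
  rfl

-- ---- reachability in exactly n presses, and minimal press counts ----

def reachIn (N K : Int) (start : List Int) (switch : List (List Int)) :
    Nat → List Int → Prop
  | 0, x => x = start
  | n + 1, x => ∃ u, reachIn N K start switch n u ∧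
      x ∈ (PySem.List.pyRange 0 K).map (fun i => nextStatusA N switch i u)

def minAt (N K : Int) (start : List Int) (switch : List (List Int)) (n : Nat)
    (x : List Int) : Prop :=
  reachIn N K start switch n x ∧ ∀ e < n, ¬ reachIn N K start switch e x

def GoalHit (N K : Int) (start : List Int) (switch : List (List Int)) (n : Nat) : Prop :=
  ∃ g, (endStatesA N).contains g = true ∧ minAt N K start switch n g

def ReachHit (N K : Int) (start : List Int) (switch : List (List Int)) (n : Nat) : Prop :=
  ∃ g, (endStatesA N).contains g = true ∧ reachIn N K start switch n g

lemma exists_minAt (N K : Int) (start : List Int) (switch : List (List Int))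
    (n : Nat) (x : List Int) (h : reachIn N K start switch n x) :
    ∃ m ≤ n, minAt N K start switch m x := by
  induction n using Nat.strong_induction_on with
  | _ n ih =>
    by_cases hmin : ∀ e < n, ¬ reachIn N K start switch e x
    · exact ⟨n, le_refl n, h, hmin⟩
    · push Not at hmin
      obtain ⟨e, he, hre⟩ := hmin
      obtain ⟨m, hm, hmin⟩ := ih e he hre
      exact ⟨m, by omega, hmin⟩

lemma pred_minAt (N K : Int) (start : List Int) (switch : List (List Int))
    (n : Nat) (x : List Int) (h : minAt N K start switch (n + 1) x) :
    ∃ u, minAt N K start switch n u ∧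
      x ∈ (PySem.List.pyRange 0 K).map (fun i => nextStatusA N switch i u) := by
  obtain ⟨⟨u, hu, hmem⟩, hleast⟩ := h
  obtain ⟨m, hm, hminu⟩ := exists_minAt N K start switch n u hu
  have : ¬ (m + 1 < n + 1) := by
    intro hlt
    exact hleast (m + 1) hlt ⟨u, hminu.1, hmem⟩
  have hmn : m = n := by omega
  exact ⟨u, hmn ▸ hminu, hmem⟩

lemma no_minAt_mono (N K : Int) (start : List Int) (switch : List (List Int))
    (d : Nat) (h : ∀ x, ¬ minAt N K start switch d x) :
    ∀ n, d ≤ n → ∀ x, ¬ minAt N K start switch n x := by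
  intro n
  induction n with
  | zero => intro hd; exact (by omega : d = 0) ▸ h
  | succ n ih =>
    intro hd x hx
    rcases Nat.lt_or_ge d (n + 1) with hlt | hge
    · obtain ⟨u, hu, _⟩ := pred_minAt N K start switch n x hx
      exact ih (by omega) u hu
    · exact h x ((by omega : d = n + 1) ▸ hx)

lemma levels_char (N K : Int) (start : List Int) (switch : List (List Int)) :
    ∀ (fuel : Nat) (frontier seen : PySem.Set (List Int)) (d : Nat) (r : Int),
    levelsB N K switch (endStatesA N) fuel frontier seen (d : Int) = some r →
    (∀ x, x ∈ frontier ↔ minAt N K start switch d x) →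
    (∀ x, x ∈ seen ↔ ∃ e ≤ d, reachIn N K start switch e x) →
    (r = -1 ∧ ∀ n, d ≤ n → ¬ GoalHit N K start switch n) ∨
    (∃ n : Nat, r = (n : Int) ∧ d ≤ n ∧ GoalHit N K start switch n ∧
      ∀ e, d ≤ e → e < n → ¬ GoalHit N K start switch e) := by
  intro fuel
  induction fuel with
  | zero =>
    intro frontier seen d r hrun Hfr Hsn
    match frontier with
    | [] =>
      rw [levelsB_nil] at hrun
      left
      refine ⟨(Option.some.inj hrun).symm, fun n hn hGH => ?_⟩
      obtain ⟨g, _, hmin⟩ := hGH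
      exact no_minAt_mono N K start switch d
        (fun x hx => by simpa using (Hfr x).mpr hx) n hn g hmin
    | t :: fr => exact absurd hrun (by simp [levelsB])
  | succ fuel ih =>
    intro frontier seen d r hrun Hfr Hsn
    match frontier with
    | [] =>
      rw [levelsB_nil] at hrun
      left
      refine ⟨(Option.some.inj hrun).symm, fun n hn hGH => ?_⟩
      obtain ⟨g, _, hmin⟩ := hGH
      exact no_minAt_mono N K start switch d
        (fun x hx => by simpa using (Hfr x).mpr hx) n hn g hmin
    | t :: fr =>
      rw [levelsB] at hrun
      by_cases hint : PySem.Set.inter (t :: fr) (endStatesA N) ≠ []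
      · rw [if_pos hint] at hrun
        obtain ⟨g, hgmem, hgc⟩ := List.any_eq_true.mp ((inter_ne_any _ _).mp hint)
        right
        exact ⟨d, (Option.some.inj hrun).symm, le_refl d,
          ⟨g, hgc, (Hfr g).mp hgmem⟩, fun e h1 h2 => absurd (by omega : d ≤ e ∧ e < d) (by omega)⟩
      · rw [if_neg hint] at hrun
        have hnog : ¬ GoalHit N K start switch d := by
          rintro ⟨g, hgc, hgmin⟩
          exact hint ((inter_ne_any _ _).mpr
            (List.any_eq_true.mpr ⟨g, (Hfr g).mpr hgmin, hgc⟩))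
        set nxt := PySem.Set.diff
          (PySem.Set.ofList ((t :: fr).flatMap
            (fun u => (PySem.List.pyRange 0 K).map (fun i => nextStatusA N switch i u)))) seen
          with hnxt
        have Hfr' : ∀ x, x ∈ nxt ↔ minAt N K start switch (d + 1) x := by
          intro x
          rw [hnxt, PySem.Set.mem_diff, PySem.Set.mem_ofList]
          constructor
          · rintro ⟨hin, hout⟩
            obtain ⟨u, hu, hmem⟩ := List.mem_flatMap.mp hin
            refine ⟨⟨u, ((Hfr u).mp hu).1, hmem⟩, fun e he hre => ?_⟩
            exact hout ((Hsn x).mpr ⟨e, by omega, hre⟩)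
          · intro hmin
            obtain ⟨u, hu, hmem⟩ := pred_minAt N K start switch d x hmin
            refine ⟨List.mem_flatMap.mpr ⟨u, (Hfr u).mpr hu, hmem⟩, fun hx => ?_⟩
            obtain ⟨e, he, hre⟩ := (Hsn x).mp hx
            exact hmin.2 e (by omega) hre
        have Hsn' : ∀ x, x ∈ PySem.Set.union seen nxt ↔
            ∃ e ≤ d + 1, reachIn N K start switch e x := by
          intro x
          rw [hnxt, union_nxt, List.mem_append, ← hnxt]
          constructor
          · rintro (hx | hx)
            · obtain ⟨e, he, hre⟩ := (Hsn x).mp hx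
              exact ⟨e, by omega, hre⟩
            · exact ⟨d + 1, le_refl _, ((Hfr' x).mp hx).1⟩
          · rintro ⟨e, he, hre⟩
            by_cases hold : ∃ e' ≤ d, reachIn N K start switch e' x
            · exact Or.inl ((Hsn x).mpr hold)
            · push Not at hold
              have hed : e = d + 1 := by
                rcases Nat.lt_or_ge e (d + 1) with h | h
                · exact absurd hre (hold e (by omega))
                · omega
              refine Or.inr ((Hfr' x).mpr ⟨hed ▸ hre, fun e' he' hre' => ?_⟩)
              exact hold e' (by omega) hre'
        have hcast : ((d : Int) + 1) = (((d + 1 : Nat)) : Int) := by push_cast; ring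
        rw [hcast] at hrun
        rcases ih nxt (PySem.Set.union seen nxt) (d + 1) r hrun Hfr' Hsn' with
          ⟨hr, hall⟩ | ⟨n, hn, hdn, hGoal, hleast⟩
        · left
          refine ⟨hr, fun n hn hGH => ?_⟩
          rcases Nat.eq_or_lt_of_le hn with h | h
          · exact hnog (h ▸ hGH)
          · exact hall n (by omega) hGH
        · right
          refine ⟨n, hn, by omega, hGoal, fun e h1 h2 => ?_⟩
          rcases Nat.eq_or_lt_of_le h1 with h | h
          · exact h ▸ hnog
          · exact hleast e (by omega) h2

lemma solve_char (N K : Int) (start : List Int) (switch : List (List Int)) :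
    (solve N K start switch = -1 ∧ ∀ n, ¬ GoalHit N K start switch n) ∨
    (∃ n : Nat, solve N K start switch = (n : Int) ∧ GoalHit N K start switch n ∧
      ∀ e < n, ¬ GoalHit N K start switch e) := by
  have hnd : ([start] : List (List Int)).Nodup := List.nodup_singleton _
  have hsh : ∀ x ∈ ([start] : List (List Int)), x = start ∨ x ∈ statesAll N.toNat :=
    fun x hx => Or.inl (List.mem_singleton.mp hx)
  have hsome := suffB N K switch (endStatesA N) start (5 ^ N.toNat + 3) [start] [start] 0
    hnd hsh (by simp)
  obtain ⟨r, hr⟩ := Option.isSome_iff_exists.mp hsome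
  have hsolve : solve N K start switch = r := solve_eq_levels N K start switch r hr
  have hr0 : levelsB N K switch (endStatesA N) (5 ^ N.toNat + 3) [start] [start]
      ((0 : Nat) : Int) = some r := by simpa using hr
  have Hfr : ∀ x, x ∈ ([start] : PySem.Set (List Int)) ↔ minAt N K start switch 0 x := by
    intro x
    simp only [List.mem_singleton, minAt]
    constructor
    · rintro rfl
      exact ⟨rfl, by omega⟩
    · rintro ⟨hx, _⟩
      exact hx
  have Hsn : ∀ x, x ∈ ([start] : PySem.Set (List Int)) ↔
      ∃ e ≤ 0, reachIn N K start switch e x := by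
    intro x
    simp only [List.mem_singleton]
    constructor
    · rintro rfl
      exact ⟨0, le_refl _, rfl⟩
    · rintro ⟨e, he, hre⟩
      have : e = 0 := by omega
      subst this
      exact hre
  rcases levels_char N K start switch (5 ^ N.toNat + 3) [start] [start] 0 r hr0 Hfr Hsn with
    ⟨hrr, hall⟩ | ⟨n, hn, _, hGoal, hleast⟩
  · exact Or.inl ⟨hrr ▸ hsolve, fun n => hall n (Nat.zero_le n)⟩
  · exact Or.inr ⟨n, hn ▸ hsolve, hGoal, fun e he => hleast e (Nat.zero_le e) he⟩

-- ---- the closed form: states reached by press-count combinations ----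

def reducedB (N : Int) (start : List Int) : List Int :=
  (PySem.List.pyRange 0 N).map (fun j => PySem.Int.mod (PySem.List.pyGetD start j 0) 5)

def WSg : List Int → (Nat → Int) → Int
  | [], _ => 0
  | a :: t, g => a * g 0 + WSg t (fun i => g (i + 1))

def wRow (switch : List (List Int)) (j : Int) (i : Nat) : Int :=
  PySem.List.pyGetD (PySem.List.pyGetD switch (i : Int) []) j 0

def SF (N : Int) (start : List Int) (switch : List (List Int)) (c : List Int) : List Int :=
  (PySem.List.pyRange 0 N).map (fun j =>
    PySem.Int.mod (PySem.List.pyGetD start j 0 + WSg c (wRow switch j)) 5)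

lemma WSg_split (a b : Int) :
    ∀ (l r : List Int) (g : Nat → Int),
    WSg (l ++ a :: r) g = WSg (l ++ b :: r) g + (a - b) * g l.length := by
  intro l
  induction l with
  | nil => intro r g; simp [WSg]; ring
  | cons x l ih =>
    intro r g
    simp only [List.cons_append, WSg, List.length_cons, ih]
    ring

lemma WSg_replicate_zero (n : Nat) (g : Nat → Int) : WSg (List.replicate n 0) g = 0 := by
  induction n generalizing g with
  | zero => rfl
  | succ n ih => simp [List.replicate_succ, WSg, ih]

lemma WSg_mod_dvd : ∀ (c : List Int) (g : Nat → Int),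
    (5 : Int) ∣ WSg c g - WSg (c.map (fun a => PySem.Int.mod a 5)) g := by
  intro c
  induction c with
  | nil => intro g; simp [WSg]
  | cons a t ih =>
    intro g
    simp only [List.map_cons, WSg]
    have h1 : (5 : Int) ∣ a - PySem.Int.mod a 5 := by
      have := PySem.Int.floordiv_mul_add_mod a 5
      exact ⟨PySem.Int.floordiv a 5, by linarith⟩
    have h2 := ih (fun i => g (i + 1))
    have : a * g 0 + WSg t (fun i => g (i + 1)) -
        (PySem.Int.mod a 5 * g 0 + WSg (t.map (fun a => PySem.Int.mod a 5)) (fun i => g (i + 1)))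
        = (a - PySem.Int.mod a 5) * g 0 +
          (WSg t (fun i => g (i + 1)) - WSg (t.map (fun a => PySem.Int.mod a 5)) (fun i => g (i + 1))) := by
      ring
    rw [this]
    exact dvd_add (Dvd.dvd.mul_right h1 _) h2

lemma mod5_add_inner (a b : Int) :
    PySem.Int.mod (a + PySem.Int.mod b 5) 5 = PySem.Int.mod (a + b) 5 := by
  simp only [PySem.Int.mod_eq_emod_of_pos (by norm_num : (0:Int) < 5)]
  omega

lemma mod5_congr (a b s : Int) (h : (5 : Int) ∣ a - b) :
    PySem.Int.mod (s + a) 5 = PySem.Int.mod (s + b) 5 := by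
  obtain ⟨k, hk⟩ := h
  simp only [PySem.Int.mod_eq_emod_of_pos (by norm_num : (0:Int) < 5)]
  omega

lemma SF_zeros (N : Int) (start : List Int) (switch : List (List Int)) (n : Nat) :
    SF N start switch (List.replicate n 0) = reducedB N start := by
  unfold SF reducedB
  refine List.map_congr_left (fun j hj => ?_)
  rw [WSg_replicate_zero, add_zero]

lemma press_SF (N : Int) (start : List Int) (switch : List (List Int))
    (l r : List Int) (a : Int) :
    nextStatusA N switch (l.length : Int) (SF N start switch (l ++ a :: r)) =
      SF N start switch (l ++ (a + 1) :: r) := by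
  unfold nextStatusA SF
  refine List.map_congr_left (fun j hj => ?_)
  obtain ⟨hj0, hjN⟩ := PySem.List.mem_pyRange_one.mp hj
  rw [PySem.List.pyGetD_map_pyRange_of_nonneg _ _ _ _ hj0 hjN]
  rw [mod5_add_inner]
  rw [WSg_split (a + 1) a l r (wRow switch j)]
  have hw : PySem.List.pyGetD (PySem.List.pyGetD switch (l.length : Int) []) j 0
      = wRow switch j l.length := rfl
  rw [hw]
  congr 1
  ring

lemma press_start (N : Int) (start : List Int) (switch : List (List Int)) (i : Int) :
    nextStatusA N switch i start = nextStatusA N switch i (reducedB N start) := by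
  unfold nextStatusA reducedB
  refine List.map_congr_left (fun j hj => ?_)
  obtain ⟨hj0, hjN⟩ := PySem.List.mem_pyRange_one.mp hj
  rw [PySem.List.pyGetD_map_pyRange_of_nonneg _ _ _ _ hj0 hjN, mod5_add_inner]

lemma all_zero_of_sum_zero (c : List Int) (hb : ∀ a ∈ c, 0 ≤ a) (hs : c.sum = 0) :
    ∀ a ∈ c, a = 0 := by
  induction c with
  | nil => simp
  | cons x t ih =>
    have hx : 0 ≤ x := hb x (by simp)
    have ht : ∀ a ∈ t, 0 ≤ a := fun a ha => hb a (by simp [ha])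
    have hts : 0 ≤ t.sum := List.sum_nonneg ht
    have hsx : x + t.sum = 0 := by simpa using hs
    intro a ha
    rcases List.mem_cons.mp ha with rfl | ha
    · omega
    · exact ih ht (by omega) a ha

lemma replicate_split (a b : Nat) :
    List.replicate (a + (b + 1)) (0 : Int) =
      List.replicate a (0 : Int) ++ (0 : Int) :: List.replicate b (0 : Int) := by
  rw [List.replicate_add]
  congr 1

lemma reach_to_counts (N K : Int) (start : List Int) (switch : List (List Int)) :
    ∀ (n : Nat) (x : List Int), reachIn N K start switch n x → 1 ≤ n →
    ∃ c : List Int, c.length = K.toNat ∧ (∀ a ∈ c, 0 ≤ a) ∧ c.sum = (n : Int) ∧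
      x = SF N start switch c := by
  intro n
  induction n with
  | zero => intro x _ h; omega
  | succ n ih =>
    intro x hx _
    obtain ⟨u, hu, hmem⟩ := hx
    obtain ⟨i, hi, rfl⟩ := List.mem_map.mp hmem
    obtain ⟨hi0, hiK⟩ := PySem.List.mem_pyRange_one.mp hi
    have hiT : i.toNat < K.toNat := by omega
    rcases Nat.eq_zero_or_pos n with rfl | hn
    · -- one press from the start state
      have hustart : u = start := hu
      refine ⟨List.replicate i.toNat 0 ++ 1 :: List.replicate (K.toNat - i.toNat - 1) 0,
        ?_, ?_, ?_, ?_⟩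
      · simp; omega
      · intro a ha
        rcases List.mem_append.mp ha with h | h
        · simp [List.eq_of_mem_replicate h]
        · rcases List.mem_cons.mp h with rfl | h
          · norm_num
          · simp [List.eq_of_mem_replicate h]
      · simp
      · rw [hustart]
        have hzsplit := replicate_split i.toNat (K.toNat - i.toNat - 1)
        have hz : i.toNat + (K.toNat - i.toNat - 1 + 1) = K.toNat := by omega
        rw [hz] at hzsplit
        have h1 : nextStatusA N switch i start
            = nextStatusA N switch i (SF N start switch (List.replicate K.toNat 0)) := by
          rw [SF_zeros]; exact press_start N start switch i
        rw [h1, hzsplit]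
        have h2 := press_SF N start switch (List.replicate i.toNat 0)
          (List.replicate (K.toNat - i.toNat - 1) 0) 0
        rw [List.length_replicate, Int.toNat_of_nonneg hi0] at h2
        simpa using h2
    · obtain ⟨c, hlen, hpos, hsum, rfl⟩ := ih u hu hn
      have hiC : i.toNat < c.length := by omega
      have hdec : c = c.take i.toNat ++ c.getD i.toNat 0 :: c.drop (i.toNat + 1) := by
        rw [List.getD_eq_getElem c 0 hiC]
        conv_lhs => rw [← List.take_append_drop i.toNat c]
        rw [List.drop_eq_getElem_cons hiC]
      refine ⟨c.take i.toNat ++ (c.getD i.toNat 0 + 1) :: c.drop (i.toNat + 1), ?_, ?_, ?_, ?_⟩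
      · have := congrArg List.length hdec
        simp at this ⊢
        omega
      · intro a ha
        rcases List.mem_append.mp ha with h | h
        · exact hpos a (List.mem_of_mem_take h)
        · rcases List.mem_cons.mp h with rfl | h
          · have := hpos (c.getD i.toNat 0)
              (by rw [List.getD_eq_getElem c 0 hiC]; exact List.getElem_mem hiC)
            omega
          · exact hpos a (List.mem_of_mem_drop h)
      · have h1 : c.sum = (c.take i.toNat).sum + (c.getD i.toNat 0 + (c.drop (i.toNat + 1)).sum) := by
          conv_lhs => rw [hdec]
          simp
        simp only [List.sum_append, List.sum_cons]
        push_cast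
        omega
      · have hlentake : (c.take i.toNat).length = i.toNat := by
          simp; omega
        have h3 := press_SF N start switch (c.take i.toNat) (c.drop (i.toNat + 1))
          (c.getD i.toNat 0)
        rw [hlentake, Int.toNat_of_nonneg hi0] at h3
        conv_lhs => rw [hdec]
        exact h3

lemma counts_to_reach (N K : Int) (start : List Int) (switch : List (List Int)) :
    ∀ (n : Nat) (c : List Int), c.length = K.toNat → (∀ a ∈ c, 0 ≤ a) →
    c.sum = (n : Int) → 1 ≤ n →
    reachIn N K start switch n (SF N start switch c) := by
  intro n
  induction n with
  | zero => intro c _ _ _ h; omega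
  | succ n ih =>
    intro c hlen hpos hsum _
    have hex : ∃ a ∈ c, 0 < a := by
      by_contra h
      push Not at h
      have : ∀ a ∈ c, a = 0 := by
        intro a ha
        have := hpos a ha
        have := h a ha
        omega
      have : c.sum = 0 := by
        rw [List.sum_eq_zero this]
      omega
    obtain ⟨a, hamem, hapos⟩ := hex
    obtain ⟨l, r, rfl⟩ := List.append_of_mem hamem
    have hlK : ((l ++ a :: r).length : Int) = (K.toNat : Int) := by rw [hlen]
    have hlenK : l.length < K.toNat := by
      simp at hlK; omega
    have hKpos : (0 : Int) < K := by omega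
    have hiK : ((l.length : Int)) < K := by omega
    have hsum' : (l ++ (a - 1) :: r).sum = ((n : Nat) : Int) := by
      simp at hsum ⊢
      omega
    have hstep : SF N start switch (l ++ a :: r)
        = nextStatusA N switch (l.length : Int) (SF N start switch (l ++ (a - 1) :: r)) := by
      have := press_SF N start switch l r (a - 1)
      rw [sub_add_cancel] at this
      rw [this]
    have himem : (l.length : Int) ∈ PySem.List.pyRange 0 K :=
      PySem.List.mem_pyRange_one.mpr ⟨by omega, hiK⟩
    rcases Nat.eq_zero_or_pos n with rfl | hn
    · -- the decremented combination is all zeros: one press from start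
      have hz : ∀ b ∈ l ++ (a - 1) :: r, b = 0 := by
        apply all_zero_of_sum_zero
        · intro b hb
          rcases List.mem_append.mp hb with h | h
          · exact hpos b (by simp [h])
          · rcases List.mem_cons.mp h with rfl | h
            · have := hpos a (by simp); omega
            · exact hpos b (by simp [h])
        · simpa using hsum'
      have hrep : l ++ (a - 1) :: r = List.replicate (l ++ (a - 1) :: r).length 0 :=
        List.eq_replicate_of_mem hz
      refine ⟨start, rfl, List.mem_map.mpr ⟨(l.length : Int), himem, ?_⟩⟩
      rw [hstep, hrep, SF_zeros, ← press_start]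
    · refine ⟨SF N start switch (l ++ (a - 1) :: r), ?_, ?_⟩
      · apply ih
        · simp at hlen ⊢
          omega
        · intro b hb
          rcases List.mem_append.mp hb with h | h
          · exact hpos b (by simp [h])
          · rcases List.mem_cons.mp h with rfl | h
            · have := hpos a (by simp); omega
            · exact hpos b (by simp [h])
        · exact hsum'
        · omega
      · exact List.mem_map.mpr ⟨(l.length : Int), himem, hstep.symm⟩

-- ---- sums ----

lemma sum_mod_le (c : List Int) (hb : ∀ a ∈ c, 0 ≤ a) :
    (c.map (fun a => PySem.Int.mod a 5)).sum ≤ c.sum := by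
  induction c with
  | nil => simp
  | cons a t ih =>
    have ha := hb a (by simp)
    have hm : PySem.Int.mod a 5 ≤ a := by
      rw [PySem.Int.mod_eq_emod_of_pos (by norm_num)]
      omega
    have := ih (fun x hx => hb x (by simp [hx]))
    simp only [List.map_cons, List.sum_cons]
    omega

lemma sum_pos_of_ne (c : List Int) (hb : ∀ a ∈ c, 0 ≤ a) (hnz : ∃ a ∈ c, a ≠ 0) :
    1 ≤ c.sum := by
  by_contra h
  obtain ⟨a, ha, hane⟩ := hnz
  have hs : 0 ≤ c.sum := List.sum_nonneg hb
  have hz := all_zero_of_sum_zero c hb (by omega)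
  exact hane (hz a ha)

-- ---- min-fold characterisation ----

lemma foldl_min_char {α : Type} (f : α → Bool) (t : α → Int) :
    ∀ (l : List α) (b : Int), (∀ m ∈ l, 0 ≤ t m) → (b = -1 ∨ 0 ≤ b) →
    ((l.foldl (fun b m => if f m then (if b = -1 ∨ t m < b then t m else b) else b) b = b
        ∨ ∃ m ∈ l, f m = true ∧
          l.foldl (fun b m => if f m then (if b = -1 ∨ t m < b then t m else b) else b) b = t m) ∧
     (b ≠ -1 → l.foldl (fun b m => if f m then (if b = -1 ∨ t m < b then t m else b) else b) b ≠ -1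
        ∧ l.foldl (fun b m => if f m then (if b = -1 ∨ t m < b then t m else b) else b) b ≤ b) ∧
     (∀ m ∈ l, f m = true →
        l.foldl (fun b m => if f m then (if b = -1 ∨ t m < b then t m else b) else b) b ≠ -1
        ∧ l.foldl (fun b m => if f m then (if b = -1 ∨ t m < b then t m else b) else b) b ≤ t m)) := by
  intro l
  induction l with
  | nil =>
    intro b _ hb
    exact ⟨Or.inl rfl, fun h => ⟨h, le_refl b⟩, by simp⟩
  | cons m0 l ih =>
    intro b hm hb
    simp only [List.foldl_cons]
    set b' := if f m0 then (if b = -1 ∨ t m0 < b then t m0 else b) else b with hb'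
    have hm' : ∀ m ∈ l, 0 ≤ t m := fun m hm1 => hm m (by simp [hm1])
    have hb'' : b' = -1 ∨ 0 ≤ b' := by
      rw [hb']
      split_ifs with h1 h2
      · exact Or.inr (hm m0 (by simp))
      · exact hb
      · exact hb
    obtain ⟨ih1, ih2, ih3⟩ := ih b' hm' hb''
    have hstep : (f m0 = true → b' ≠ -1 ∧ b' ≤ t m0) ∧ (b ≠ -1 → b' ≠ -1 ∧ b' ≤ b)
        ∧ (b' = b ∨ (f m0 = true ∧ b' = t m0)) := by
      have h0 := hm m0 (by simp)
      rw [hb']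
      split_ifs with h1 h2
      · exact ⟨fun _ => ⟨by omega, le_refl _⟩, fun h => ⟨by omega, by rcases h2 with h2 | h2 <;> omega⟩,
          Or.inr ⟨h1, rfl⟩⟩
      · push Not at h2
        exact ⟨fun _ => ⟨h2.1, h2.2⟩, fun h => ⟨h, le_refl b⟩, Or.inl rfl⟩
      · have h1' : f m0 = false := by simpa using h1
        exact ⟨fun h => absurd h (by simp [h1']), fun h => ⟨h, le_refl b⟩, Or.inl rfl⟩
    refine ⟨?_, ?_, ?_⟩
    · rcases ih1 with h | ⟨m, hml, hfm, hr⟩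
      · rcases hstep.2.2 with hbb | ⟨hf0, hb0⟩
        · exact Or.inl (h.trans hbb)
        · exact Or.inr ⟨m0, by simp, hf0, h.trans hb0⟩
      · exact Or.inr ⟨m, by simp [hml], hfm, hr⟩
    · intro hbne
      obtain ⟨h1, h2⟩ := hstep.2.1 hbne
      obtain ⟨h3, h4⟩ := ih2 h1
      exact ⟨h3, le_trans h4 h2⟩
    · intro m hml hfm
      rcases List.mem_cons.mp hml with rfl | hml
      · obtain ⟨h1, h2⟩ := hstep.1 hfm
        obtain ⟨h3, h4⟩ := ih2 h1
        exact ⟨h3, le_trans h4 h2⟩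
      · exact ih3 m hml hfm

-- ---- the dp dictionary: generic min-relaxation lemmas ----

lemma updMin_le (dp : PySem.Dict (List Int) Int) (d : List Int) (v : Int) :
    ∃ w, (updMin dp d v).get? d = some w ∧ w ≤ v := by
  unfold updMin
  cases h : dp.get? d with
  | none =>
    refine ⟨v, ?_, le_refl v⟩
    rw [PySem.Dict.get?_insert]
    simp
  | some w =>
    dsimp only
    split_ifs with hv
    · refine ⟨v, ?_, le_refl v⟩
      rw [PySem.Dict.get?_insert]
      simp
    · exact ⟨w, h, by omega⟩

lemma updMin_mono (dp : PySem.Dict (List Int) Int) (d : List Int) (v : Int)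
    (d' : List Int) (w : Int) (h : dp.get? d' = some w) :
    ∃ w', (updMin dp d v).get? d' = some w' ∧ w' ≤ w := by
  unfold updMin
  cases hg : dp.get? d with
  | none =>
    rw [PySem.Dict.get?_insert]
    split_ifs with he
    · rw [he, hg] at h
      cases h
    · exact ⟨w, h, le_refl w⟩
  | some w0 =>
    dsimp only
    split_ifs with hv
    · rw [PySem.Dict.get?_insert]
      split_ifs with he
      · refine ⟨v, rfl, ?_⟩
        rw [he, hg] at h
        cases h
        omega
      · exact ⟨w, h, le_refl w⟩
    · exact ⟨w, h, le_refl w⟩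

lemma updMin_mem (dp : PySem.Dict (List Int) Int) (d : List Int) (v : Int)
    (p : List Int × Int) (h : p ∈ (updMin dp d v).items) :
    p = (d, v) ∨ p ∈ dp.items := by
  unfold updMin at h
  cases hg : dp.get? d with
  | none =>
    rw [hg] at h
    rcases (PySem.Dict.mem_items_insert _ _ _ _).mp h with h | ⟨h, _⟩
    · exact Or.inl h
    · exact Or.inr h
  | some w =>
    rw [hg] at h
    dsimp only at h
    split_ifs at h with hv
    · rcases (PySem.Dict.mem_items_insert _ _ _ _).mp h with h | ⟨h, _⟩
      · exact Or.inl h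
      · exact Or.inr h
    · exact Or.inr h

-- fold-of-min-relaxation lemmas, specialised to the two fold shapes of the dp
lemma baseFold_mono (N : Int) (row : List Int) :
    ∀ (l : List Int) (dp : PySem.Dict (List Int) Int) (d : List Int) (w : Int),
    dp.get? d = some w →
    ∃ w', (l.foldl (fun nw c => updMin nw (deltaRow N row c) c) dp).get? d = some w' ∧
      w' ≤ w := by
  intro l
  induction l with
  | nil => exact fun dp d w h => ⟨w, h, le_refl w⟩
  | cons b l ih =>
    intro dp d w h
    rw [List.foldl_cons]
    obtain ⟨w1, h1, h2⟩ := updMin_mono dp (deltaRow N row b) b d w h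
    obtain ⟨w2, h3, h4⟩ := ih _ d w1 h1
    exact ⟨w2, h3, by omega⟩

lemma baseFold_reach (N : Int) (row : List Int) :
    ∀ (l : List Int) (dp : PySem.Dict (List Int) Int) (b : Int), b ∈ l →
    ∃ w, (l.foldl (fun nw c => updMin nw (deltaRow N row c) c) dp).get? (deltaRow N row b)
      = some w ∧ w ≤ b := by
  intro l
  induction l with
  | nil => intro dp b h; cases h
  | cons b0 l ih =>
    intro dp b hb
    rw [List.foldl_cons]
    rcases List.mem_cons.mp hb with rfl | hb
    · obtain ⟨w1, h1, h2⟩ := updMin_le dp (deltaRow N row b) b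
      obtain ⟨w2, h3, h4⟩ := baseFold_mono N row l _ (deltaRow N row b) w1 h1
      exact ⟨w2, h3, by omega⟩
    · exact ih _ b hb

lemma baseFold_mem (N : Int) (row : List Int) :
    ∀ (l : List Int) (dp : PySem.Dict (List Int) Int) (p : List Int × Int),
    p ∈ (l.foldl (fun nw c => updMin nw (deltaRow N row c) c) dp).items →
    p ∈ dp.items ∨ ∃ b ∈ l, p = (deltaRow N row b, b) := by
  intro l
  induction l with
  | nil => exact fun dp p h => Or.inl h
  | cons b0 l ih =>
    intro dp p h
    rw [List.foldl_cons] at h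
    rcases ih _ p h with h | ⟨b, hb, hp⟩
    · rcases updMin_mem dp (deltaRow N row b0) b0 p h with h | h
      · exact Or.inr ⟨b0, by simp, h⟩
      · exact Or.inl h
    · exact Or.inr ⟨b, by simp [hb], hp⟩

lemma outerFold_mono (N : Int) (row : List Int) :
    ∀ (l : List ((List Int × Int) × Int)) (dp : PySem.Dict (List Int) Int)
      (d : List Int) (w : Int),
    dp.get? d = some w →
    ∃ w', (l.foldl (fun nw q => updMin nw (shiftRow N row q.1.1 q.2) (q.1.2 + q.2)) dp).get? d
      = some w' ∧ w' ≤ w := by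
  intro l
  induction l with
  | nil => exact fun dp d w h => ⟨w, h, le_refl w⟩
  | cons b l ih =>
    intro dp d w h
    rw [List.foldl_cons]
    obtain ⟨w1, h1, h2⟩ := updMin_mono dp (shiftRow N row b.1.1 b.2) (b.1.2 + b.2) d w h
    obtain ⟨w2, h3, h4⟩ := ih _ d w1 h1
    exact ⟨w2, h3, by omega⟩

lemma outerFold_reach (N : Int) (row : List Int) :
    ∀ (l : List ((List Int × Int) × Int)) (dp : PySem.Dict (List Int) Int)
      (b : (List Int × Int) × Int), b ∈ l →
    ∃ w, (l.foldl (fun nw q => updMin nw (shiftRow N row q.1.1 q.2) (q.1.2 + q.2)) dp).get?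
        (shiftRow N row b.1.1 b.2) = some w ∧ w ≤ b.1.2 + b.2 := by
  intro l
  induction l with
  | nil => intro dp b h; cases h
  | cons b0 l ih =>
    intro dp b hb
    rw [List.foldl_cons]
    rcases List.mem_cons.mp hb with rfl | hb
    · obtain ⟨w1, h1, h2⟩ := updMin_le dp (shiftRow N row b.1.1 b.2) (b.1.2 + b.2)
      obtain ⟨w2, h3, h4⟩ := outerFold_mono N row l _ (shiftRow N row b.1.1 b.2) w1 h1
      exact ⟨w2, h3, by omega⟩
    · exact ih _ b hb

lemma outerFold_mem (N : Int) (row : List Int) :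
    ∀ (l : List ((List Int × Int) × Int)) (dp : PySem.Dict (List Int) Int)
      (p : List Int × Int),
    p ∈ (l.foldl (fun nw q => updMin nw (shiftRow N row q.1.1 q.2) (q.1.2 + q.2)) dp).items →
    p ∈ dp.items ∨ ∃ b ∈ l, p = (shiftRow N row b.1.1 b.2, b.1.2 + b.2) := by
  intro l
  induction l with
  | nil => exact fun dp p h => Or.inl h
  | cons b0 l ih =>
    intro dp p h
    rw [List.foldl_cons] at h
    rcases ih _ p h with h | ⟨b, hb, hp⟩
    · rcases updMin_mem dp (shiftRow N row b0.1.1 b0.2) (b0.1.2 + b0.2) p h with h | h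
      · exact Or.inr ⟨b0, by simp, h⟩
      · exact Or.inl h
    · exact Or.inr ⟨b, by simp [hb], hp⟩

-- ---- displacement vectors of count combinations ----

def DF (N : Int) (switch : List (List Int)) (c : List Int) : List Int :=
  (PySem.List.pyRange 0 N).map (fun j => PySem.Int.mod (WSg c (wRow switch j)) 5)

lemma WSg_append_singleton (a : Int) :
    ∀ (c : List Int) (g : Nat → Int), WSg (c ++ [a]) g = WSg c g + a * g c.length := by
  intro c
  induction c with
  | nil => intro g; simp [WSg]
  | cons x c ih =>
    intro g
    simp only [List.cons_append, WSg, List.length_cons, ih]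
    ring

lemma deltaRow_eq (N : Int) (switch : List (List Int)) (i : Nat) (c : Int) :
    deltaRow N (PySem.List.pyGetD switch (i : Int) []) c
      = DF N switch (List.replicate i 0 ++ [c]) := by
  unfold deltaRow DF
  refine List.map_congr_left (fun j hj => ?_)
  rw [WSg_append_singleton, WSg_replicate_zero, List.length_replicate, zero_add]
  rfl

lemma stateOf_DF (N : Int) (start : List Int) (switch : List (List Int)) (c : List Int) :
    (PySem.List.pyRange 0 N).map (fun j =>
        PySem.Int.mod (PySem.List.pyGetD start j 0
          + PySem.List.pyGetD (DF N switch c) j 0) 5)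
      = SF N start switch c := by
  unfold DF SF
  refine List.map_congr_left (fun j hj => ?_)
  obtain ⟨hj0, hjN⟩ := PySem.List.mem_pyRange_one.mp hj
  rw [PySem.List.pyGetD_map_pyRange_of_nonneg _ _ _ _ hj0 hjN, mod5_add_inner]

lemma shiftRow_eq (N : Int) (switch : List (List Int)) (c : List Int) (cc : Int) :
    shiftRow N (PySem.List.pyGetD switch (c.length : Int) []) (DF N switch c) cc
      = DF N switch (c ++ [cc]) := by
  unfold shiftRow DF
  refine List.map_congr_left (fun j hj => ?_)
  obtain ⟨hj0, hjN⟩ := PySem.List.mem_pyRange_one.mp hj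
  rw [PySem.List.pyGetD_map_pyRange_of_nonneg _ _ _ _ hj0 hjN]
  rw [add_comm (PySem.Int.mod (WSg c (wRow switch j)) 5) _, mod5_add_inner,
      WSg_append_singleton]
  congr 1
  rw [show wRow switch j c.length
      = PySem.List.pyGetD (PySem.List.pyGetD switch (c.length : Int) []) j 0 from rfl]
  ring

lemma DF_five (N : Int) (switch : List (List Int)) :
    DF N switch [(5 : Int)] = DF N switch (List.replicate 1 0) := by
  unfold DF
  refine List.map_congr_left (fun j hj => ?_)
  have h1 : WSg [(5 : Int)] (wRow switch j) = 5 * wRow switch j 0 := by simp [WSg]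
  have h2 : WSg (List.replicate 1 0) (wRow switch j) = 0 := WSg_replicate_zero 1 _
  rw [h1, h2]
  have h3 := mod5_congr (5 * wRow switch j 0) 0 0 ⟨wRow switch j 0, by ring⟩
  rw [zero_add, zero_add] at h3
  exact h3

-- ---- the dp invariant ----

def InvDP (N : Int) (switch : List (List Int)) (i : Nat)
    (dp : PySem.Dict (List Int) Int) : Prop :=
  (∀ p ∈ dp.items, ∃ c : List Int, c.length = i ∧ (∀ a ∈ c, 0 ≤ a) ∧ (∃ a ∈ c, a ≠ 0) ∧
      c.sum = p.2 ∧ p.1 = DF N switch c) ∧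
  (∀ c : List Int, c.length = i → (∀ a ∈ c, 0 ≤ a ∧ a < 5) → (∃ a ∈ c, a ≠ 0) →
      ∃ v, dp.get? (DF N switch c) = some v ∧ v ≤ c.sum) ∧
  (∃ v, dp.get? (DF N switch (List.replicate i 0)) = some v ∧ v ≤ 5)

lemma dpInit_inv (N : Int) (switch : List (List Int)) :
    InvDP N switch 1 (dpInit N (PySem.List.pyGetD switch 0 [])) := by
  have h0 : (PySem.List.pyGetD switch (0 : Int) []) =
      (PySem.List.pyGetD switch ((0 : Nat) : Int) []) := by norm_num
  have hinit : dpInit N (PySem.List.pyGetD switch 0 []) =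
      (PySem.List.pyRange 1 6).foldl
        (fun dp c => updMin dp (deltaRow N (PySem.List.pyGetD switch 0 []) c) c)
        PySem.Dict.empty := rfl
  refine ⟨?_, ?_, ?_⟩
  · intro p hp
    rw [hinit] at hp
    rcases baseFold_mem N (PySem.List.pyGetD switch 0 [])
        (PySem.List.pyRange 1 6) PySem.Dict.empty p hp with h | ⟨c, hc, rfl⟩
    · simp [PySem.Dict.empty] at h
    · obtain ⟨hc1, hc5⟩ := PySem.List.mem_pyRange_one.mp hc
      refine ⟨[c], rfl, by simp; omega, ⟨c, by simp, by omega⟩, by simp, ?_⟩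
      show deltaRow N (PySem.List.pyGetD switch 0 []) c = DF N switch [c]
      rw [h0, deltaRow_eq N switch 0 c]
      rfl
  · intro c hlen hbnd hnz
    obtain ⟨a, rfl⟩ : ∃ a, c = [a] := by
      cases c with
      | nil => simp at hlen
      | cons a t =>
        cases t with
        | nil => exact ⟨a, rfl⟩
        | cons b t => simp at hlen
    have ha := hbnd a (by simp)
    have hane : a ≠ 0 := by
      obtain ⟨x, hx, hxne⟩ := hnz
      simp at hx
      exact hx ▸ hxne
    have hmem : a ∈ PySem.List.pyRange 1 6 := PySem.List.mem_pyRange_one.mpr ⟨by omega, by omega⟩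
    obtain ⟨w, hw, hwle⟩ := baseFold_reach N (PySem.List.pyGetD switch 0 [])
      (PySem.List.pyRange 1 6) PySem.Dict.empty a hmem
    refine ⟨w, ?_, by simpa using hwle⟩
    rw [hinit]
    have hk : deltaRow N (PySem.List.pyGetD switch 0 []) a = DF N switch [a] := by
      rw [h0, deltaRow_eq N switch 0 a]; rfl
    rw [← hk]
    exact hw
  · have hmem : (5 : Int) ∈ PySem.List.pyRange 1 6 :=
      PySem.List.mem_pyRange_one.mpr ⟨by norm_num, by norm_num⟩
    obtain ⟨w, hw, hwle⟩ := baseFold_reach N (PySem.List.pyGetD switch 0 [])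
      (PySem.List.pyRange 1 6) PySem.Dict.empty 5 hmem
    refine ⟨w, ?_, hwle⟩
    rw [hinit]
    have hk : deltaRow N (PySem.List.pyGetD switch 0 []) 5
        = DF N switch (List.replicate 1 0) := by
      rw [h0, deltaRow_eq N switch 0 5]
      exact DF_five N switch
    rw [← hk]
    exact hw

lemma dpStep_flat (N : Int) (row : List Int) (dp : PySem.Dict (List Int) Int) :
    dpStep N row dp =
      (dp.items.flatMap (fun p => (PySem.List.pyRange 0 5).map (fun c => (p, c)))).foldl
        (fun nw q => updMin nw (shiftRow N row q.1.1 q.2) (q.1.2 + q.2))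
        ((PySem.List.pyRange 1 5).foldl (fun nw c => updMin nw (deltaRow N row c) c)
          PySem.Dict.empty) := by
  unfold dpStep
  rw [List.foldl_flatMap]
  congr 1

lemma dpStep_inv (N : Int) (switch : List (List Int)) (i : Nat)
    (dp : PySem.Dict (List Int) Int) (hInv : InvDP N switch i dp) :
    InvDP N switch (i + 1) (dpStep N (PySem.List.pyGetD switch (i : Int) []) dp) := by
  obtain ⟨hS, hC, hF⟩ := hInv
  rw [dpStep_flat]
  set row := PySem.List.pyGetD switch (i : Int) [] with hrow
  set base := (PySem.List.pyRange 1 5).foldl (fun nw c => updMin nw (deltaRow N row c) c)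
    PySem.Dict.empty with hbase
  set items := dp.items.flatMap (fun p => (PySem.List.pyRange 0 5).map (fun c => (p, c)))
    with hitems
  -- key computation for flattened entries coming from a sound dp item
  have hkey : ∀ (p : List Int × Int), p ∈ dp.items → ∀ cc : Int,
      ∃ c : List Int, c.length = i ∧ (∀ a ∈ c, 0 ≤ a) ∧ (∃ a ∈ c, a ≠ 0) ∧ c.sum = p.2 ∧
        shiftRow N row p.1 cc = DF N switch (c ++ [cc]) := by
    intro p hp cc
    obtain ⟨c, hlen, hpos, hnz, hsum, hdf⟩ := hS p hp
    refine ⟨c, hlen, hpos, hnz, hsum, ?_⟩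
    rw [hdf, hrow, ← hlen]
    exact shiftRow_eq N switch c cc
  refine ⟨?_, ?_, ?_⟩
  · -- soundness
    intro p hp
    rcases outerFold_mem N row items base p hp with hpb | ⟨q, hq, rfl⟩
    · -- entries of base: fresh single-count combos for switch i
      rw [hbase] at hpb
      rcases baseFold_mem N row
          (PySem.List.pyRange 1 5) PySem.Dict.empty p hpb with h | ⟨cc, hcc, rfl⟩
      · simp [PySem.Dict.empty] at h
      · obtain ⟨h1, h5⟩ := PySem.List.mem_pyRange_one.mp hcc
        refine ⟨List.replicate i 0 ++ [cc], by simp, ?_, ?_, by simp, ?_⟩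
        · intro a ha
          rcases List.mem_append.mp ha with h | h
          · simp [List.eq_of_mem_replicate h]
          · simp at h
            omega
        · exact ⟨cc, by simp, by omega⟩
        · show deltaRow N row cc = _
          rw [hrow]
          exact deltaRow_eq N switch i cc
    · obtain ⟨p0, hp0, hq⟩ := List.mem_flatMap.mp hq
      obtain ⟨cc, hcc, rfl⟩ := List.mem_map.mp hq
      obtain ⟨hc0, hc5⟩ := PySem.List.mem_pyRange_one.mp hcc
      obtain ⟨c, hlen, hpos, hnz, hsum, hkeyeq⟩ := hkey p0 hp0 cc
      refine ⟨c ++ [cc], by simp [hlen], ?_, ?_, by simp [hsum], by simpa using hkeyeq⟩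
      · intro a ha
        rcases List.mem_append.mp ha with h | h
        · exact hpos a h
        · simp at h
          omega
      · obtain ⟨a, ha, hane⟩ := hnz
        exact ⟨a, by simp [ha], hane⟩
  · -- completeness
    intro c' hlen' hbnd' hnz'
    have hne : c' ≠ [] := by
      intro h
      rw [h] at hlen'
      simp at hlen'
    obtain ⟨c, cc, rfl⟩ : ∃ c cc, c' = c ++ [cc] :=
      ⟨c'.dropLast, c'.getLast hne, (List.dropLast_append_getLast hne).symm⟩
    have hlen : c.length = i := by simp at hlen'; omega
    have hccb := hbnd' cc (by simp)
    have hcb : ∀ a ∈ c, 0 ≤ a ∧ a < 5 := fun a ha => hbnd' a (by simp [ha])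
    have hsum' : (c ++ [cc]).sum = c.sum + cc := by simp
    by_cases hz : ∃ a ∈ c, a ≠ 0
    · -- the prefix is itself a nonzero combo known to dp
      obtain ⟨v, hv, hvle⟩ := hC c hlen hcb hz
      have hpm : (DF N switch c, v) ∈ dp.items := PySem.Dict.mem_items_of_get?_eq_some dp hv
      have hqm : ((DF N switch c, v), cc) ∈ items := by
        rw [hitems]
        exact List.mem_flatMap.mpr ⟨(DF N switch c, v), hpm,
          List.mem_map.mpr ⟨cc, PySem.List.mem_pyRange_one.mpr ⟨by omega, by omega⟩, rfl⟩⟩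
      obtain ⟨w, hw, hwle⟩ := outerFold_reach N row items base _ hqm
      dsimp only at hwle
      refine ⟨w, ?_, by rw [hsum']; omega⟩
      have hk : shiftRow N row (DF N switch c) cc = DF N switch (c ++ [cc]) := by
        rw [hrow, ← hlen]
        exact shiftRow_eq N switch c cc
      rw [← hk]
      exact hw
    · -- the prefix is all zeros: cc ≥ 1 and the fresh base entry covers it
      push Not at hz
      have hccpos : cc ≠ 0 := by
        obtain ⟨a, ha, hane⟩ := hnz'
        rcases List.mem_append.mp ha with h | h
        · exact absurd (hz a h) hane
        · simp at h
          exact h ▸ hane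
      have hcz : c = List.replicate i 0 := by
        rw [← hlen]
        exact List.eq_replicate_of_mem hz
      have hccm : cc ∈ PySem.List.pyRange 1 5 :=
        PySem.List.mem_pyRange_one.mpr ⟨by omega, by omega⟩
      obtain ⟨w0, hw0, hw0le⟩ := baseFold_reach N row
        (PySem.List.pyRange 1 5) PySem.Dict.empty cc hccm
      rw [← hbase] at hw0
      obtain ⟨w, hw, hwle⟩ := outerFold_mono N row items base _ w0 hw0
      refine ⟨w, ?_, ?_⟩
      · have hk : deltaRow N row cc = DF N switch (c ++ [cc]) := by
          rw [hrow, hcz]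
          exact deltaRow_eq N switch i cc
        rw [← hk]
        exact hw
      · have hsc : c.sum = 0 := List.sum_eq_zero (by intro a ha; exact hz a ha)
        rw [hsum', hsc]
        omega
  · -- the all-cancelling entry survives
    obtain ⟨v, hv, hvle⟩ := hF
    have hpm : (DF N switch (List.replicate i 0), v) ∈ dp.items :=
      PySem.Dict.mem_items_of_get?_eq_some dp hv
    have hqm : ((DF N switch (List.replicate i 0), v), (0 : Int)) ∈ items := by
      rw [hitems]
      exact List.mem_flatMap.mpr ⟨_, hpm,
        List.mem_map.mpr ⟨0, PySem.List.mem_pyRange_one.mpr ⟨by omega, by omega⟩, rfl⟩⟩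
    obtain ⟨w, hw, hwle⟩ := outerFold_reach N row items base _ hqm
    dsimp only at hwle
    refine ⟨w, ?_, by omega⟩
    have h1 : shiftRow N row (DF N switch (List.replicate i 0)) 0
        = DF N switch (List.replicate i 0 ++ [0]) := by
      rw [hrow]
      have := shiftRow_eq N switch (List.replicate i 0) 0
      rw [List.length_replicate] at this
      exact this
    have h2 : List.replicate i 0 ++ [(0 : Int)] = List.replicate (i + 1) 0 := by
      rw [List.replicate_succ']
    rw [← h2, ← h1]
    exact hw

lemma dpFold_inv (N K : Int) (switch : List (List Int)) :
    ∀ (cnt a : Nat) (dp : PySem.Dict (List Int) Int), 1 ≤ a → (a : Int) + cnt = K →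
    InvDP N switch a dp →
    InvDP N switch (a + cnt)
      (((PySem.List.pyRange (a : Int) K)).foldl
        (fun dp i => dpStep N (PySem.List.pyGetD switch i []) dp) dp) := by
  intro cnt
  induction cnt with
  | zero =>
    intro a dp ha hK hInv
    have hnil : PySem.List.pyRange (a : Int) K = [] :=
      List.eq_nil_iff_forall_not_mem.mpr (fun x hx => by
        have := PySem.List.mem_pyRange_one.mp hx
        omega)
    rw [hnil]
    simpa using hInv
  | succ cnt ih =>
    intro a dp ha hK hInv
    have hlt : (a : Int) < K := by omega
    rw [PySem.List.pyRange_one_cons hlt, List.foldl_cons]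
    have hcast : (a : Int) + 1 = ((a + 1 : Nat) : Int) := by push_cast; ring
    rw [hcast]
    have hstep := dpStep_inv N switch a dp hInv
    have := ih (a + 1) (dpStep N (PySem.List.pyGetD switch (a : Int) []) dp)
      (by omega) (by omega) hstep
    have harith : a + 1 + cnt = a + (cnt + 1) := by omega
    rw [harith] at this
    exact this

-- ---- assembling the equality ----

lemma goalHit_to_reachHit (N K : Int) (start : List Int) (switch : List (List Int))
    (n : Nat) (h : GoalHit N K start switch n) : ReachHit N K start switch n := by
  obtain ⟨g, hc, hmin⟩ := h
  exact ⟨g, hc, hmin.1⟩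

lemma reachHit_to_goalHit (N K : Int) (start : List Int) (switch : List (List Int))
    (n : Nat) (h : ReachHit N K start switch n) :
    ∃ m ≤ n, GoalHit N K start switch m := by
  obtain ⟨g, hc, hre⟩ := h
  obtain ⟨m, hm, hmin⟩ := exists_minAt N K start switch n g hre
  exact ⟨m, hm, g, hc, hmin⟩

lemma exists_pos_entry (c : List Int) (hb : ∀ a ∈ c, 0 ≤ a) (hs : 1 ≤ c.sum) :
    ∃ a ∈ c, 0 < a := by
  by_contra h
  push Not at h
  have hz : ∀ a ∈ c, a = 0 := by
    intro a ha
    have := hb a ha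
    have := h a ha
    omega
  rw [List.sum_eq_zero hz] at hs
  omega

theorem ports_eq (N K : Int) (start : List Int) (switch : List (List Int)) :
    solve N K start switch = solve_alt N K start switch := by
  have hchar := solve_char N K start switch
  by_cases hstart : (goalsB N).contains start = true
  · -- the start state is already uniform: both sides return 0
    have hB : solve_alt N K start switch = 0 := by
      simp only [solve_alt]
      rw [if_pos hstart]
    have hGH0 : GoalHit N K start switch 0 :=
      ⟨start, hstart, rfl, by omega⟩
    rcases hchar with ⟨_, hall⟩ | ⟨n, hs, _, hleast⟩
    · exact absurd hGH0 (hall 0)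
    · have hn0 : n = 0 := by
        by_contra h
        exact hleast 0 (by omega) hGH0
      rw [hB, hs, hn0]
      rfl
  · have hnGH0 : ¬ GoalHit N K start switch 0 := by
      rintro ⟨g, hc, hmin, _⟩
      have : g = start := hmin
      exact hstart (this ▸ hc)
    by_cases hK : K ≤ 0
    · -- no switches: unreachable unless already uniform
      have hB : solve_alt N K start switch = -1 := by
        simp only [solve_alt]
        rw [if_neg hstart, if_pos hK]
      have hnGH : ∀ n, ¬ GoalHit N K start switch n := by
        intro n
        match n with
        | 0 => exact hnGH0
        | n + 1 =>
          rintro ⟨g, hc, ⟨u, _, hmem⟩, _⟩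
          obtain ⟨i, hi, _⟩ := List.mem_map.mp hmem
          obtain ⟨hi0, hiK⟩ := PySem.List.mem_pyRange_one.mp hi
          omega
      rcases hchar with ⟨hs, _⟩ | ⟨n, _, hGn, _⟩
      · rw [hs, hB]
      · exact absurd hGn (hnGH n)
    · by_cases hN : N ≤ 0
      · -- no positions: one press of any switch yields the empty, uniform state
        have hB : solve_alt N K start switch = 1 := by
          simp only [solve_alt]
          rw [if_neg hstart, if_neg hK, if_pos hN]
        have hrange : PySem.List.pyRange 0 N = ([] : List Int) :=
          List.eq_nil_iff_forall_not_mem.mpr (fun x hx => by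
            have := PySem.List.mem_pyRange_one.mp hx
            omega)
        have hnil : nextStatusA N switch 0 start = [] := by
          unfold nextStatusA
          rw [hrange]
          rfl
        have hcont : (endStatesA N).contains ([] : List Int) = true := by
          have h0 : N.toNat = 0 := by omega
          unfold endStatesA
          rw [h0]
          decide
        have hRH : ReachHit N K start switch 1 := by
          refine ⟨[], hcont, start, rfl, ?_⟩
          exact List.mem_map.mpr ⟨0, PySem.List.mem_pyRange_one.mpr ⟨le_refl _, by omega⟩, hnil⟩
        obtain ⟨m, hm1, hGHm⟩ := reachHit_to_goalHit N K start switch 1 hRH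
        rcases hchar with ⟨_, hall⟩ | ⟨n, hs, hGn, hleast⟩
        · exact absurd hGHm (hall m)
        · have hn1 : n = 1 := by
            have hnm : ¬ m < n := fun hlt => hleast m hlt hGHm
            have hn0 : n ≠ 0 := fun h => hnGH0 (h ▸ hGn)
            omega
          rw [hB, hs, hn1]
          rfl
      · -- at least one switch and one position: compare with the dp minimum
        have hK1 : (1 : Int) ≤ K := by omega
        set dpF := (PySem.List.pyRange 1 K).foldl
          (fun dp i => dpStep N (PySem.List.pyGetD switch i []) dp)
          (dpInit N (PySem.List.pyGetD switch 0 [])) with hdpF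
        set f : List Int × Int → Bool := fun p =>
          (goalsB N).contains ((PySem.List.pyRange 0 N).map (fun j =>
            PySem.Int.mod (PySem.List.pyGetD start j 0 + PySem.List.pyGetD p.1 j 0) 5))
          with hfdef
        have hBeq : solve_alt N K start switch =
            dpF.items.foldl (fun best p => if f p then
              (if best = -1 ∨ p.2 < best then p.2 else best) else best) (-1) := by
          simp only [solve_alt]
          rw [if_neg hstart, if_neg hK, if_neg hN]
        have hInvF : InvDP N switch K.toNat dpF := by
          have h1 := dpFold_inv N K switch (K.toNat - 1) 1
            (dpInit N (PySem.List.pyGetD switch 0 [])) (le_refl 1)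
            (by push_cast; omega) (dpInit_inv N switch)
          have harith : 1 + (K.toNat - 1) = K.toNat := by omega
          rw [harith] at h1
          have hone : ((1 : Nat) : Int) = (1 : Int) := by norm_num
          rw [hone] at h1
          exact h1
        obtain ⟨hS, hC, hF⟩ := hInvF
        have hbound : ∀ p ∈ dpF.items, 0 ≤ p.2 := by
          intro p hp
          obtain ⟨c, _, hpos, _, hsum, _⟩ := hS p hp
          rw [← hsum]
          exact List.sum_nonneg hpos
        obtain ⟨F1, F2, F3⟩ := foldl_min_char f (fun p => p.2) dpF.items (-1)
          hbound (Or.inl rfl)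
        -- each listed candidate is realised by a press sequence
        have HitOfF : ∀ p ∈ dpF.items, f p = true →
            ReachHit N K start switch (p.2.toNat) ∧ 1 ≤ p.2 := by
          intro p hp hfp
          obtain ⟨c, hlen, hpos, hnz, hsum, hdf⟩ := hS p hp
          have h1 : 1 ≤ c.sum := sum_pos_of_ne c hpos hnz
          have hr := counts_to_reach N K start switch c.sum.toNat c hlen hpos
            (by omega) (by omega)
          refine ⟨⟨SF N start switch c, ?_, by rw [← hsum]; exact hr⟩, by omega⟩
          simp only [hfdef] at hfp
          rw [hdf, stateOf_DF] at hfp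
          exact hfp
        -- every realised press count dominates a listed candidate
        have CompHit : ∀ n : Nat, ReachHit N K start switch n → 1 ≤ n →
            ∃ p ∈ dpF.items, f p = true ∧ p.2 ≤ (n : Int) := by
          intro n hRH hn1
          obtain ⟨g, hgc, hre⟩ := hRH
          obtain ⟨c, hlen, hpos, hsum, rfl⟩ := reach_to_counts N K start switch n g hre hn1
          set cmod := c.map (fun a => PySem.Int.mod a 5) with hcm
          have hbm : ∀ a ∈ cmod, 0 ≤ a ∧ a < 5 := by
            intro a ha
            obtain ⟨b, _, rfl⟩ := List.mem_map.mp ha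
            exact ⟨PySem.Int.mod_nonneg _ (by norm_num), PySem.Int.mod_lt _ (by norm_num)⟩
          have hlenm : cmod.length = K.toNat := by rw [hcm, List.length_map, hlen]
          have hSFeq : SF N start switch c = SF N start switch cmod := by
            unfold SF
            refine List.map_congr_left (fun j hj => ?_)
            exact mod5_congr _ _ _ (WSg_mod_dvd c (wRow switch j))
          by_cases hz : ∀ a ∈ cmod, a = 0
          · -- reachable only through a fully cancelling combination: the cost-5 entry
            obtain ⟨v, hv, hvle⟩ := hF
            have hcz : cmod = List.replicate K.toNat 0 := by
              rw [← hlenm]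
              exact List.eq_replicate_of_mem hz
            have hn5 : 5 ≤ (n : Int) := by
              obtain ⟨a, ha, hapos⟩ := exists_pos_entry c hpos (by omega)
              have hmod0 : PySem.Int.mod a 5 = 0 := hz _ (List.mem_map.mpr ⟨a, ha, rfl⟩)
              have h5a : (5 : Int) ∣ a := by
                rw [PySem.Int.mod_eq_emod_of_pos (by norm_num)] at hmod0
                omega
              have ha5 : 5 ≤ a := by
                obtain ⟨k, rfl⟩ := h5a
                omega
              obtain ⟨l', r', rfl⟩ := List.append_of_mem ha
              have h1 : 0 ≤ l'.sum := List.sum_nonneg (fun x hx => hpos x (by simp [hx]))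
              have h2 : 0 ≤ r'.sum := List.sum_nonneg (fun x hx => hpos x (by simp [hx]))
              have h3 : (l' ++ a :: r').sum = l'.sum + (a + r'.sum) := by simp
              omega
            refine ⟨(DF N switch (List.replicate K.toNat 0), v),
              PySem.Dict.mem_items_of_get?_eq_some dpF hv, ?_, by omega⟩
            rw [hfdef]
            show (goalsB N).contains _ = true
            rw [stateOf_DF, ← hcz, ← hSFeq]
            exact hgc
          · push Not at hz
            obtain ⟨v, hv, hvle⟩ := hC cmod hlenm hbm hz
            refine ⟨(DF N switch cmod, v),
              PySem.Dict.mem_items_of_get?_eq_some dpF hv, ?_, ?_⟩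
            · rw [hfdef]
              show (goalsB N).contains _ = true
              rw [stateOf_DF, ← hSFeq]
              exact hgc
            · have := sum_mod_le c hpos
              rw [← hcm] at this
              omega
        rcases hchar with ⟨hs, hall⟩ | ⟨n, hs, hGn, hleast⟩
        · -- unreachable: the fold keeps -1
          have hnf : ∀ p ∈ dpF.items, ¬ f p = true := by
            intro p hp hfp
            obtain ⟨hRH, _⟩ := HitOfF p hp hfp
            obtain ⟨m0, _, hGH⟩ := reachHit_to_goalHit N K start switch _ hRH
            exact hall m0 hGH
          rcases F1 with h | ⟨p, hp, hfp, _⟩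
          · rw [hs, hBeq, h]
          · exact absurd hfp (hnf p hp)
        · -- reachable: the fold computes exactly the least press count
          have hn1 : 1 ≤ n := by
            rcases Nat.eq_zero_or_pos n with rfl | h
            · exact absurd hGn hnGH0
            · exact h
          obtain ⟨p, hp, hfp, hple⟩ :=
            CompHit n (goalHit_to_reachHit N K start switch n hGn) hn1
          obtain ⟨hne, hle⟩ := F3 p hp hfp
          have hlower : (n : Int) ≤ dpF.items.foldl (fun best p => if f p then
              (if best = -1 ∨ p.2 < best then p.2 else best) else best) (-1) := by
            rcases F1 with h | ⟨p', hp', hfp', hr⟩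
            · exact absurd h hne
            · obtain ⟨hRH, ht1⟩ := HitOfF p' hp' hfp'
              obtain ⟨m0, hm0, hGH⟩ := reachHit_to_goalHit N K start switch _ hRH
              have : ¬ m0 < n := fun hlt => hleast m0 hlt hGH
              rw [hr]
              omega
          rw [hs, hBeq]
          omega

-- ===== VERDICT (by name: the statement is the Claim_ definition above) =====
theorem solve_spec : Claim_equal_solve := by
  intro N K start switch _ _
  unfold Spec_solve
  exact ports_eq N K start switch
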